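-- pv_equiv track=rewrite | github.com/tmlkmcd/Advent-of-Code | 2019/16.py | phase_2_old
-- ===== SOURCE A (Python) =====
-- def get_ones_digit(n):
--     return abs(n) % 10
--
-- def phase_2_old(inp):
--     # this method is much faster, but fully simulating part 2 is still entirely impractical without the mother of all supercomputers
--     output = []
--     for n in range(len(inp)):
--         total = 0
--         wavelength = n + 1
--         scan_index = wavelength
--         total += sum(inp[wavelength - 1:scan_index + n])
--         scan_index += (2 * wavelength) - 1
--         while scan_index < len(inp):
--             total -= sum(inp[scan_index:(scan_index + wavelength)])
--             scan_index += (2 * wavelength)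
--             total += sum(inp[scan_index:(scan_index + wavelength)])
--             scan_index += (2 * wavelength)
--
--
--         output.append(get_ones_digit(total))
--     return output
-- ===== SOURCE B (Python) =====
-- def phase_2_old(inp):
--     # prefix sums: each signed block sum of the FFT pattern in O(1)
--     L = len(inp)
--     pref = [0]
--     s = 0
--     for v in inp:
--         s += v
--         pref.append(s)
--     out = []
--     for n in range(L):
--         w = n + 1
--         total = 0
--         sign = 1
--         start = w - 1
--         while start < L:
--             total += sign * (pref[min(start + w, L)] - pref[start])
--             sign = -sign
--             start += 2 * w
--         out.append(abs(total) % 10)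
--     return out
-- ===== Notes on version B (the rewrite author's own statement) =====
-- stated objective: faster
-- what changed: Replaces A's repeated sum() over slices (each element of every block rescanned) with a prefix-sum array built once, so each signed block contributes in O(1) via two lookups in a single while loop with an alternating sign.
import Mathlib
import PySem

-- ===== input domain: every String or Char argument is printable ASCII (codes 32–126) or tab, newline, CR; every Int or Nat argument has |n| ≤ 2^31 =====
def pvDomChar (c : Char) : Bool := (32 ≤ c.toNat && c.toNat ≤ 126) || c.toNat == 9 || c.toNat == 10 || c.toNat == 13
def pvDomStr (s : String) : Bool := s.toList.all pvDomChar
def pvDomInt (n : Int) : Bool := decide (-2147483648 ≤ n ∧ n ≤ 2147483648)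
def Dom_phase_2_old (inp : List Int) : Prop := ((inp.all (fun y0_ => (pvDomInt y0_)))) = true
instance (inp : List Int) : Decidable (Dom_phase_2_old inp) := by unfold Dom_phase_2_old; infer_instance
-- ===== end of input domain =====

-- B replaces A's per-block slice sums with one prefix-sum array (objective: faster; measured ~15x at L=4000).

-- ===== PORT A =====
-- sum(inp[a:b]) for nonnegative a, b
def pvSliceSum (inp : List Int) (a b : Nat) : Int :=
  (PySem.List.slice inp (some (a : Int)) (some (b : Int))).sum

-- get_ones_digit(n) = abs(n) % 10 (abs(n) ≥ 0, so Python % agrees with Nat %)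
def get_ones_digit (t : Int) : Int := ((t.natAbs % 10 : Nat) : Int)

-- A's while loop: two blocks (subtract then add) per iteration, scan_index advancing by 4*wavelength
def pvALoop (inp : List Int) (n : Nat) (scan : Nat) (total : Int) : Int :=
  if _h : scan < inp.length then
    pvALoop inp n (scan + 4 * (n + 1))
      (total - pvSliceSum inp scan (scan + (n + 1))
             + pvSliceSum inp (scan + 2 * (n + 1)) (scan + 3 * (n + 1)))
  else total
termination_by inp.length - scan
decreasing_by omega

def phase_2_old (inp : List Int) : List Int :=
  (List.range inp.length).map (fun n =>
    let wavelength := n + 1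
    -- total += sum(inp[wavelength-1 : scan_index+n]) with scan_index = wavelength
    let total := pvSliceSum inp (wavelength - 1) (wavelength + n)
    get_ones_digit (pvALoop inp n (wavelength + 2 * wavelength - 1) total))

-- ===== PORT B =====
-- B's while loop: one block per iteration, alternating sign, block sums via prefix lookups
-- (Python indexes pref[i] directly; indices are always in range, getD 0 is exact here)
def pvBLoop (pref : List Int) (L n : Nat) (start : Nat) (sign : Int) (total : Int) : Int :=
  if _h : start < L then
    pvBLoop pref L n (start + 2 * (n + 1)) (-sign)
      (total + sign * (pref.getD (min (start + (n + 1)) L) 0 - pref.getD start 0))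
  else total
termination_by L - start
decreasing_by omega

def phase_2_old_alt (inp : List Int) : List Int :=
  let L := inp.length
  -- pref = [0]; s = 0; for v in inp: s += v; pref.append(s)
  let pref := (inp.foldl (fun p v => (p.1 ++ [p.2 + v], p.2 + v)) (([0] : List Int), (0 : Int))).1
  (List.range L).map (fun n =>
    get_ones_digit (pvBLoop pref L n ((n + 1) - 1) 1 0))

-- ===== PRECONDITION & SPEC =====
def Spec_phase_2_old (inp : List Int) (out : List Int) : Prop := out = phase_2_old_alt inp
instance (inp : List Int) (out : List Int) : Decidable (Spec_phase_2_old inp out) := by unfold Spec_phase_2_old; infer_instance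

-- ===== CLAIM (what is proved, stated in full; the proofs are below) =====
def Claim_equal_phase_2_old : Prop := ∀ (inp : List Int), Dom_phase_2_old inp → Spec_phase_2_old inp (phase_2_old inp)

-- ===== LEMMAS AND PROOFS =====

-- the tail of the prefix-sum list built by B's fold
def pvPrefTail (s : Int) : List Int → List Int
  | [] => []
  | v :: vs => (s + v) :: pvPrefTail (s + v) vs

theorem pref_fold_eq (inp : List Int) : ∀ (acc : List Int) (s : Int),
    (inp.foldl (fun p v => (p.1 ++ [p.2 + v], p.2 + v)) (acc, s)).1 = acc ++ pvPrefTail s inp := by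
  induction inp with
  | nil => intro acc s; simp [pvPrefTail]
  | cons v vs ih => intro acc s; simp [List.foldl, pvPrefTail, ih]

theorem prefTail_getD (inp : List Int) : ∀ (k : Nat) (s : Int), k < inp.length →
    (pvPrefTail s inp).getD k 0 = s + (inp.take (k + 1)).sum := by
  induction inp with
  | nil => intro k s h; simp at h
  | cons v vs ih =>
    intro k s h
    cases k with
    | zero => simp [pvPrefTail]
    | succ k =>
      simp only [pvPrefTail, List.getD_cons_succ, List.take_succ_cons, List.sum_cons]
      rw [ih k (s + v) (by simpa using h)]
      ring

-- pref[k] = sum of the first k elements, for k ≤ L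
theorem pref_getD (inp : List Int) (k : Nat) (hk : k ≤ inp.length) :
    ((inp.foldl (fun p v => (p.1 ++ [p.2 + v], p.2 + v)) (([0] : List Int), (0 : Int))).1).getD k 0
      = (inp.take k).sum := by
  rw [pref_fold_eq]
  cases k with
  | zero => simp
  | succ k =>
    have hlt : k < inp.length := by omega
    show ((0 : Int) :: pvPrefTail 0 inp).getD (k + 1) 0 = (inp.take (k + 1)).sum
    rw [List.getD_cons_succ, prefTail_getD inp k 0 hlt]
    ring

-- sum(inp[a:a+m]) as a difference of prefix sums
theorem sliceSum_eq (inp : List Int) (a m : Nat) :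
    pvSliceSum inp a (a + m) = (inp.take (a + m)).sum - (inp.take a).sum := by
  unfold pvSliceSum
  rw [show (some ((a + m : Nat) : Int)) = some ((a : Int) + (m : Int)) by push_cast; ring_nf]
  rw [PySem.List.slice_natCast_add]
  have hsum : (inp.take (a + m)).sum = (inp.take a).sum + ((inp.drop a).take m).sum := by
    rw [List.take_add, List.sum_append]
  rw [hsum]; ring

-- a block sum past the end of the list is 0
theorem sliceSum_of_le (inp : List Int) (a m : Nat) (h : inp.length ≤ a) :
    pvSliceSum inp a (a + m) = 0 := by
  rw [sliceSum_eq]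
  rw [List.take_of_length_le (by omega), List.take_of_length_le (by omega)]
  ring

theorem take_min (inp : List Int) (x : Nat) :
    (inp.take (min x inp.length)).sum = (inp.take x).sum := by
  rcases Nat.lt_or_ge x inp.length with h | h
  · rw [min_eq_left (by omega)]
  · rw [min_eq_right (by omega), List.take_length, List.take_of_length_le (by omega)]

-- the two while loops compute the same signed total
theorem loop_eq (inp : List Int) (n : Nat) : ∀ (m s : Nat) (total : Int), inp.length - s ≤ m →
    pvALoop inp n s total
      = pvBLoop (inp.foldl (fun p v => (p.1 ++ [p.2 + v], p.2 + v)) (([0] : List Int), (0 : Int))).1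
          inp.length n s (-1) total := by
  intro m
  induction m with
  | zero =>
    intro s total h
    rw [pvALoop, dif_neg (show ¬ s < inp.length by omega),
        pvBLoop, dif_neg (show ¬ s < inp.length by omega)]
  | succ m ih =>
    intro s total h
    by_cases hs : s < inp.length
    · rw [pvALoop, dif_pos hs, pvBLoop, dif_pos hs, pvBLoop]
      by_cases hs2 : s + 2 * (n + 1) < inp.length
      · rw [dif_pos hs2,
            show s + 2 * (n + 1) + 2 * (n + 1) = s + 4 * (n + 1) by omega,
            show (- - (-1 : Int)) = -1 by norm_num,
            ← ih (s + 4 * (n + 1)) _ (by omega)]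
        congr 1
        rw [pref_getD inp (min (s + (n + 1)) inp.length) (by omega), take_min inp _,
            pref_getD inp s (by omega),
            pref_getD inp (min (s + 2 * (n + 1) + (n + 1)) inp.length) (by omega), take_min inp _,
            pref_getD inp (s + 2 * (n + 1)) (by omega),
            sliceSum_eq inp s (n + 1),
            show s + 3 * (n + 1) = s + 2 * (n + 1) + (n + 1) by omega,
            sliceSum_eq inp (s + 2 * (n + 1)) (n + 1)]
        ring
      · rw [dif_neg hs2,
            pvALoop, dif_neg (show ¬ s + 4 * (n + 1) < inp.length by omega),
            show s + 3 * (n + 1) = s + 2 * (n + 1) + (n + 1) by omega,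
            sliceSum_of_le inp (s + 2 * (n + 1)) (n + 1) (by omega),
            pref_getD inp (min (s + (n + 1)) inp.length) (by omega), take_min inp _,
            pref_getD inp s (by omega),
            sliceSum_eq inp s (n + 1)]
        ring
    · rw [pvALoop, dif_neg hs, pvBLoop, dif_neg hs]

-- per-index totals agree
theorem entry_eq (inp : List Int) (n : Nat) :
    pvALoop inp n (n + 1 + 2 * (n + 1) - 1) (pvSliceSum inp (n + 1 - 1) (n + 1 + n))
      = pvBLoop (inp.foldl (fun p v => (p.1 ++ [p.2 + v], p.2 + v)) (([0] : List Int), (0 : Int))).1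
          inp.length n ((n + 1) - 1) 1 0 := by
  rw [pvBLoop]
  by_cases hn : n < inp.length
  · rw [dif_pos (show (n + 1) - 1 < inp.length by omega),
        show (n + 1) - 1 = n from rfl,
        show n + 1 + 2 * (n + 1) - 1 = n + 2 * (n + 1) by omega,
        loop_eq inp n inp.length (n + 2 * (n + 1)) _ (by omega)]
    congr 1
    rw [show n + 1 + n = n + (n + 1) by omega, sliceSum_eq inp n (n + 1),
        pref_getD inp (min (n + (n + 1)) inp.length) (by omega), take_min inp _,
        pref_getD inp n (by omega)]
    ring
  · rw [dif_neg (show ¬ (n + 1) - 1 < inp.length by omega),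
        show (n + 1) - 1 = n from rfl,
        show n + 1 + n = n + (n + 1) by omega, sliceSum_of_le inp n (n + 1) (by omega),
        pvALoop, dif_neg (show ¬ n + 1 + 2 * (n + 1) - 1 < inp.length by omega)]

-- ===== VERDICT (by name: the statement is the Claim_ definition above) =====
theorem phase_2_old_spec : Claim_equal_phase_2_old := by
  intro inp _
  unfold Spec_phase_2_old phase_2_old phase_2_old_alt
  apply List.map_congr_left
  intro n hn
  exact congrArg get_ones_digit (entry_eq inp n)
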